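-- pv_equiv track=rewrite | github.com/NIKsaurabh/speech-to-written-English | spokenToWrittenEng/myfunctions.py | n_tuple
-- ===== SOURCE A (Python) =====
-- def n_tuple(lst):
--     n_tpl = {'single':1,'double':2,'triple':3,'quadruple':4}
--     i=0
--     while i<len(lst):
--         if lst[i].lower() in n_tpl and len(lst)>=i+1 and len(lst[i+1]) == 1:
--             lst[i:i+2] = [n_tpl[lst[i]] * lst[i+1]]
--         else:
--             i+=1
--     return(lst)
-- ===== SOURCE B (Python) =====
-- def n_tuple(lst):
--     # Single forward pass building a new list, consuming a matched pair at once
--     # (instead of rewriting the list in place with slice assignment).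
--     # Mutates lst in place (lst[:] = out) like A does, and returns it.
--     n_tpl = {'single': 1, 'double': 2, 'triple': 3, 'quadruple': 4}
--     out = []
--     i = 0
--     n = len(lst)
--     while i < n:
--         w = lst[i]
--         if w.lower() in n_tpl and i + 1 < n and len(lst[i + 1]) == 1:
--             out.append(n_tpl[w] * lst[i + 1])
--             i += 2
--         else:
--             out.append(w)
--             i += 1
--     lst[:] = out
--     return lst
-- ===== Notes on version B (the rewrite author's own statement) =====
-- stated objective: alternative
-- what changed: A repeatedly rewrites the list in place with slice assignment (shifting the tail on every match and re-examining the rewritten cell); B does one forward pass over the input building a new list, consuming a matched pair in a single step.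
import Mathlib
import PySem

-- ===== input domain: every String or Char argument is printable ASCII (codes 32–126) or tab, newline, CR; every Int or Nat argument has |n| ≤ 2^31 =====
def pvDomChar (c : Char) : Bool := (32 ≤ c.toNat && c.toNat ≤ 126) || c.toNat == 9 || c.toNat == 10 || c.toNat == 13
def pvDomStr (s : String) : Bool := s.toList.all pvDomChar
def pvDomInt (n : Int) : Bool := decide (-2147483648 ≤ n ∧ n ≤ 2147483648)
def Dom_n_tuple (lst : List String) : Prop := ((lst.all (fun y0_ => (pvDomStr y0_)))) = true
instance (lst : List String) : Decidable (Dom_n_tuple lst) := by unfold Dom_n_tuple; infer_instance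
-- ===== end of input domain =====

-- B replaces A's in-place slice rewriting by one forward pass that builds the output,
-- consuming a matched pair at once (A mutates its argument in place; B performs the
-- same mutation in Python; the equivalence proved here is about the return value).

-- shared helpers: the literal dict of A and B, and Python's  n * s  string repetition (exact: for n ≤ 0 Python yields '')
def pvKeys : PySem.Dict String Int := PySem.Dict.ofList [("single",1),("double",2),("triple",3),("quadruple",4)]
def pvRep (n : Int) (s : String) : String := String.ofList (List.flatten (List.replicate n.toNat s.toList))

-- ===== PORT A =====
-- A's while loop: at index i either rewrite lst[i:i+2] in place and stay at i, or advance.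
-- Where Python raises (IndexError on lst[i+1], KeyError on n_tpl[lst[i]]) the port treats the
-- lookup as 'no match' resp. multiplier 0 — those inputs are excluded by Pre_n_tuple.
def n_tupleLoop (lst : List String) (i : Nat) : List String :=
  if h : i < lst.length then
    if hc : pvKeys.contains (PySem.Str.lower lst[i]) = true ∧ lst.length ≥ i + 1 ∧
        (PySem.List.pyGet? lst ((i : Int) + 1)).any (fun x => x.toList.length == 1) = true then
      n_tupleLoop
        (lst.take i ++ [pvRep (pvKeys.getD lst[i] 0) (PySem.List.pyGetD lst ((i : Int) + 1) "")]
          ++ lst.drop (i + 2)) i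
    else n_tupleLoop lst (i + 1)
  else lst
termination_by lst.length - i
decreasing_by
  · have hx : i + 1 < lst.length := by
      rcases hc with ⟨-, -, hany⟩
      have : PySem.List.pyGet? lst ((i : Int) + 1) = PySem.List.pyGet? lst ((i + 1 : Nat) : Int) := by
        push_cast; rfl
      rw [this, PySem.List.pyGet?_natCast] at hany
      cases hget : lst[i + 1]? with
      | none => rw [hget] at hany; simp at hany
      | some x =>
        obtain ⟨hlt, -⟩ := List.getElem?_eq_some_iff.mp hget
        exact hlt
    simp only [List.length_append, List.length_take, List.length_cons, List.length_nil,
      List.length_drop]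
    omega
  · omega

def n_tuple (lst : List String) : List String := n_tupleLoop lst 0

-- ===== PORT B =====
-- B's single pass (the Lean transcription of Source B's while loop over out/i: structural
-- recursion on the remaining suffix, consuming two elements on a match)
def altRec : List String → List String
  | [] => []
  | [w] => [w]
  | w :: x :: rest =>
    if pvKeys.contains (PySem.Str.lower w) && x.toList.length == 1 then
      pvRep (pvKeys.getD w 0) x :: altRec rest
    else
      w :: altRec (x :: rest)

def n_tuple_alt (lst : List String) : List String := altRec lst

-- ===== PRECONDITION & SPEC =====
-- Pre_ excludes exactly the inputs on which A raises: a KeyError when a word equal to a dict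
-- key only after .lower() (e.g. 'Double') is followed by a length-1 string, and an IndexError
-- when the list's last word lowercases to a dict key (lst[i+1] is read past the end).
def Pre_n_tuple (lst : List String) : Prop :=
  ((lst.zip lst.tail).all (fun p =>
      !(pvKeys.contains (PySem.Str.lower p.1) && p.2.toList.length == 1) || pvKeys.contains p.1)) = true
  ∧ (lst.getLast?.all (fun w => !pvKeys.contains (PySem.Str.lower w))) = true
instance (lst : List String) : Decidable (Pre_n_tuple lst) := by unfold Pre_n_tuple; infer_instance

def pvWitness_n_tuple : List String := ["double", "d", "x"]

def Spec_n_tuple (lst : List String) (out : List String) : Prop := out = n_tuple_alt lst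
instance (lst : List String) (out : List String) : Decidable (Spec_n_tuple lst out) := by unfold Spec_n_tuple; infer_instance

-- ===== CLAIM (what is proved, stated in full; the proofs are below) =====
def Claim_equal_n_tuple : Prop := ∀ (lst : List String), Dom_n_tuple lst → Pre_n_tuple lst → Spec_n_tuple lst (n_tuple lst)

-- ===== LEMMAS AND PROOFS =====

-- a repetition of a single character is never (even lowercased) a key of the dict
theorem not_key_rep (m : Nat) (c : Char) :
    pvKeys.contains (PySem.Str.lower (String.ofList (List.replicate m c))) = false := by
  by_contra h
  rw [Bool.not_eq_false, PySem.Dict.contains_iff_mem_keys] at h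
  have hk : pvKeys.keys = ["single","double","triple","quadruple"] := by decide
  rw [hk] at h
  have hrep : (PySem.Str.lower (String.ofList (List.replicate m c))).toList
      = List.replicate m (PySem.Chars.lowerChar c) := by
    simp [PySem.Str.toList_lower, PySem.Chars.lower, List.map_replicate]
  simp only [List.mem_cons, List.not_mem_nil, or_false] at h
  rcases h with h | h | h | h <;>
  · have h2 := (List.eq_replicate_iff.mp ((congrArg String.toList h).symm.trans hrep)).2
    first
    | exact absurd ((h2 's' (by decide)).trans (h2 'i' (by decide)).symm) (by decide)
    | exact absurd ((h2 'd' (by decide)).trans (h2 'o' (by decide)).symm) (by decide)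
    | exact absurd ((h2 't' (by decide)).trans (h2 'r' (by decide)).symm) (by decide)
    | exact absurd ((h2 'q' (by decide)).trans (h2 'u' (by decide)).symm) (by decide)

theorem not_key_pvRep (n : Int) (x : String) (hx : x.toList.length = 1) :
    pvKeys.contains (PySem.Str.lower (pvRep n x)) = false := by
  obtain ⟨c, hc⟩ : ∃ c, x.toList = [c] := by
    cases hxl : x.toList with
    | nil => rw [hxl] at hx; simp at hx
    | cons a l => rw [hxl] at hx; simp at hx; exact ⟨a, by rw [hx]⟩
  rw [pvRep, hc, List.flatten_replicate_singleton]
  exact not_key_rep _ _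

-- the loop of A, started at the boundary pre ++ suf, produces pre ++ altRec suf
theorem loop_eq (n : Nat) : ∀ (suf pre : List String), suf.length = n →
    n_tupleLoop (pre ++ suf) pre.length = pre ++ altRec suf := by
  induction n using Nat.strong_induction_on with
  | _ n ih =>
    intro suf pre hlen
    match suf with
    | [] =>
      rw [n_tupleLoop]
      simp [altRec]
    | [w] =>
      rw [n_tupleLoop]
      have hlt : pre.length < (pre ++ [w]).length := by simp
      have hnone : PySem.List.pyGet? (pre ++ [w]) ((pre.length : Int) + 1) = none := by
        have hcast : ((pre.length : Int) + 1) = ((pre.length + 1 : Nat) : Int) := by push_cast; rfl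
        rw [hcast, PySem.List.pyGet?_natCast]
        simp
      rw [dif_pos hlt, dif_neg (by rintro ⟨-, -, h3⟩; rw [hnone] at h3; simp at h3)]
      have hih := ih 0 (by simp at hlen; omega) [] (pre ++ [w]) rfl
      simp only [List.append_nil, altRec] at hih
      rw [show pre.length + 1 = (pre ++ [w]).length by simp, hih]
      simp [altRec]
    | w :: x :: rest =>
      rw [n_tupleLoop]
      have hlt : pre.length < (pre ++ w :: x :: rest).length := by simp
      have hw : (pre ++ w :: x :: rest)[pre.length]'hlt = w := by
        rw [List.getElem_append_right (le_refl pre.length)]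
        simp
      have hsome : PySem.List.pyGet? (pre ++ w :: x :: rest) ((pre.length : Int) + 1) = some x := by
        have hcast : ((pre.length : Int) + 1) = ((pre.length + 1 : Nat) : Int) := by push_cast; rfl
        rw [hcast, PySem.List.pyGet?_natCast, List.getElem?_append_right (by omega)]
        simp
      rw [dif_pos hlt]
      by_cases hcond : pvKeys.contains (PySem.Str.lower w) = true ∧ x.toList.length = 1
      · -- match: A rewrites in place and stays; B emits the repetition and drops the pair
        have hcd : pvKeys.contains (PySem.Str.lower ((pre ++ w :: x :: rest)[pre.length]'hlt)) = true ∧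
            (pre ++ w :: x :: rest).length ≥ pre.length + 1 ∧
            (PySem.List.pyGet? (pre ++ w :: x :: rest) ((pre.length : Int) + 1)).any
              (fun x => x.toList.length == 1) = true := by
          refine ⟨by rw [hw]; exact hcond.1, by simp, by rw [hsome]; simp only [Option.any_some, beq_iff_eq]; exact hcond.2⟩
        rw [dif_pos hcd, hw]
        have htake : (pre ++ w :: x :: rest).take pre.length = pre := by
          simp
        have hdrop : (pre ++ w :: x :: rest).drop (pre.length + 2) = rest := by
          rw [show pre ++ w :: x :: rest = (pre ++ [w, x]) ++ rest by simp,
            show pre.length + 2 = (pre ++ [w, x]).length by simp]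
          exact List.drop_left
        have hgetD : PySem.List.pyGetD (pre ++ w :: x :: rest) ((pre.length : Int) + 1) "" = x := by
          have hcast : ((pre.length : Int) + 1) = ((pre.length + 1 : Nat) : Int) := by push_cast; rfl
          rw [hcast, PySem.List.pyGetD_natCast, List.getD_eq_getElem?_getD,
            List.getElem?_append_right (by omega)]
          simp
        rw [htake, hdrop, hgetD]
        set r := pvRep (pvKeys.getD w 0) x with hr
        rw [show pre ++ [r] ++ rest = pre ++ (r :: rest) by simp]
        rw [ih (rest.length + 1) (by simp at hlen; omega) (r :: rest) pre rfl]
        congr 1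
        have hrhs : altRec (w :: x :: rest) = r :: altRec rest := by
          rw [altRec, if_pos (by simp [hcond.1, hcond.2])]
        rw [hrhs]
        cases rest with
        | nil => simp [altRec]
        | cons y ys =>
          rw [altRec, if_neg]
          rw [hr, not_key_pvRep _ _ hcond.2]
          simp
      · -- no match: both keep w
        rw [dif_neg (by
          rintro ⟨h1, -, h3⟩
          rw [hw] at h1
          rw [hsome] at h3
          simp only [Option.any_some, beq_iff_eq] at h3
          exact hcond ⟨h1, h3⟩)]
        rw [show pre ++ w :: x :: rest = (pre ++ [w]) ++ (x :: rest) by simp,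
          show pre.length + 1 = (pre ++ [w]).length by simp,
          ih (x :: rest).length (by simp at hlen ⊢; omega) (x :: rest) (pre ++ [w]) rfl]
        have hrhs : altRec (w :: x :: rest) = w :: altRec (x :: rest) := by
          rw [altRec, if_neg (by intro hb; simp at hb; exact hcond ⟨hb.1, hb.2⟩)]
        rw [hrhs]
        simp

-- ===== VERDICT (by name: the statement is the Claim_ definition above) =====
theorem n_tuple_spec : Claim_equal_n_tuple := by
  intro lst _ _
  unfold Spec_n_tuple n_tuple n_tuple_alt
  have := loop_eq lst.length lst [] rfl
  simpa using this
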